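-- pv_equiv track=rewrite | github.com/anushk7777/ATS-Scorer-AI | job_matching_system.py | _are_related_technologies
-- ===== SOURCE A (Python) =====
-- def _are_related_technologies(skill1: str, skill2: str) -> bool:
--     """
--     Check if two technologies are related in the same stack.
--
--     Args:
--         skill1: First technology
--         skill2: Second technology
--
--     Returns:
--         True if technologies are related
--     """
--     tech_stacks = [
--         ['react', 'redux', 'jsx', 'javascript'],
--         ['angular', 'typescript', 'rxjs'],
--         ['vue', 'vuex', 'nuxt'],
--         ['python', 'django', 'flask', 'fastapi'],
--         ['java', 'spring', 'hibernate'],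
--         ['node.js', 'express', 'javascript'],
--         ['aws', 'ec2', 's3', 'lambda', 'cloudformation'],
--         ['docker', 'kubernetes', 'containerization'],
--         ['sql', 'mysql', 'postgresql', 'database']
--     ]
--
--     for stack in tech_stacks:
--         if skill1 in stack and skill2 in stack:
--             return True
--
--     return False
-- ===== SOURCE B (Python) =====
-- # Precomputed inverted index: each skill maps to the set of tech-stack ids
-- # it belongs to; two skills are related iff their id-sets intersect.
-- _STACK_INDEX = {
--     'react': {0}, 'redux': {0}, 'jsx': {0}, 'javascript': {0, 5},
--     'angular': {1}, 'typescript': {1}, 'rxjs': {1},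
--     'vue': {2}, 'vuex': {2}, 'nuxt': {2},
--     'python': {3}, 'django': {3}, 'flask': {3}, 'fastapi': {3},
--     'java': {4}, 'spring': {4}, 'hibernate': {4},
--     'node.js': {5}, 'express': {5},
--     'aws': {6}, 'ec2': {6}, 's3': {6}, 'lambda': {6}, 'cloudformation': {6},
--     'docker': {7}, 'kubernetes': {7}, 'containerization': {7},
--     'sql': {8}, 'mysql': {8}, 'postgresql': {8}, 'database': {8},
-- }
--
-- def _are_related_technologies(skill1: str, skill2: str) -> bool:
--     """Answer by set intersection in a precomputed skill -> stack-ids index."""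
--     return bool(_STACK_INDEX.get(skill1, set()) & _STACK_INDEX.get(skill2, set()))
-- ===== Notes on version B (the rewrite author's own statement) =====
-- stated objective: alternative
-- what changed: Replaced the per-query scan of every stack (nested membership tests) by a precomputed inverted index mapping each skill to its set of stack ids, answered with a single dict lookup per skill and one set intersection.
import Mathlib
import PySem

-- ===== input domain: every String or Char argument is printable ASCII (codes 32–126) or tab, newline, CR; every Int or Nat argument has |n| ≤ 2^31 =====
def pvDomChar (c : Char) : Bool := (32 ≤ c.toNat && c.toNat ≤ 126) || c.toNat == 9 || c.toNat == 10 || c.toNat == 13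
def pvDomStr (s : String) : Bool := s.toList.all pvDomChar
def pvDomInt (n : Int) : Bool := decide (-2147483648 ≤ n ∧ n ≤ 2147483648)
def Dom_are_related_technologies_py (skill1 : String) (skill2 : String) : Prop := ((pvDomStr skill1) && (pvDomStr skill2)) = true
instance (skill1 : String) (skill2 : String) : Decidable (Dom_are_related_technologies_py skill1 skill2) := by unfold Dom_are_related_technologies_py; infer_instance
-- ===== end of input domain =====

-- B replaces A's per-query scan of all stacks by a precomputed inverted index
-- (skill -> set of stack ids) queried with one set intersection; alternative, not claimed faster.

-- ===== PORT A =====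
def pvStacksA : List (List String) := [
  ["react", "redux", "jsx", "javascript"],
  ["angular", "typescript", "rxjs"],
  ["vue", "vuex", "nuxt"],
  ["python", "django", "flask", "fastapi"],
  ["java", "spring", "hibernate"],
  ["node.js", "express", "javascript"],
  ["aws", "ec2", "s3", "lambda", "cloudformation"],
  ["docker", "kubernetes", "containerization"],
  ["sql", "mysql", "postgresql", "database"]]

-- the 'for stack in tech_stacks: if …: return True' loop, with early return
def pvALoop (skill1 skill2 : String) : List (List String) → Bool
  | [] => false
  | stack :: rest =>
    if stack.contains skill1 && stack.contains skill2 then true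
    else pvALoop skill1 skill2 rest

def are_related_technologies_py (skill1 : String) (skill2 : String) : Bool :=
  pvALoop skill1 skill2 pvStacksA

-- ===== PORT B =====
-- the precomputed inverted index _STACK_INDEX (dict literal, insertion order)
def pvStackIndex : PySem.Dict String (PySem.Set Int) := PySem.Dict.ofList
  [("react", [0]), ("redux", [0]), ("jsx", [0]), ("javascript", [0, 5]),
   ("angular", [1]), ("typescript", [1]), ("rxjs", [1]),
   ("vue", [2]), ("vuex", [2]), ("nuxt", [2]),
   ("python", [3]), ("django", [3]), ("flask", [3]), ("fastapi", [3]),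
   ("java", [4]), ("spring", [4]), ("hibernate", [4]),
   ("node.js", [5]), ("express", [5]),
   ("aws", [6]), ("ec2", [6]), ("s3", [6]), ("lambda", [6]), ("cloudformation", [6]),
   ("docker", [7]), ("kubernetes", [7]), ("containerization", [7]),
   ("sql", [8]), ("mysql", [8]), ("postgresql", [8]), ("database", [8])]

-- bool(_STACK_INDEX.get(skill1, set()) & _STACK_INDEX.get(skill2, set()))
def are_related_technologies_py_alt (skill1 : String) (skill2 : String) : Bool :=
  !(PySem.Set.inter (pvStackIndex.getD skill1 []) (pvStackIndex.getD skill2 [])).isEmpty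

-- ===== PRECONDITION & SPEC =====
def Spec_are_related_technologies_py (skill1 : String) (skill2 : String) (out : Bool) : Prop := out = are_related_technologies_py_alt skill1 skill2
instance (skill1 : String) (skill2 : String) (out : Bool) : Decidable (Spec_are_related_technologies_py skill1 skill2 out) := by unfold Spec_are_related_technologies_py; infer_instance

-- ===== CLAIM =====
def Claim_equal_are_related_technologies_py : Prop := ∀ (skill1 : String) (skill2 : String), Dom_are_related_technologies_py skill1 skill2 → Spec_are_related_technologies_py skill1 skill2 (are_related_technologies_py skill1 skill2)

-- ===== LEMMAS AND PROOFS =====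

-- all skills occurring anywhere in A's table
def pvAllSkills : List String := pvStacksA.flatten

lemma pvALoop_eq_any (s1 s2 : String) (L : List (List String)) :
    pvALoop s1 s2 L = L.any (fun st => st.contains s1 && st.contains s2) := by
  induction L with
  | nil => rfl
  | cons st rest ih =>
    simp only [pvALoop, List.any_cons]
    split_ifs with h
    · rw [h, Bool.true_or]
    · simp only [Bool.not_eq_true] at h
      rw [h, Bool.false_or, ih]

lemma pv_contains_false_of_notin {s : String} (h : s ∉ pvAllSkills)
    {st : List String} (hst : st ∈ pvStacksA) : st.contains s = false := by
  rw [List.contains_eq_mem]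
  simpa using fun hm => h (List.mem_flatten.mpr ⟨st, hst, hm⟩)

lemma pvA_false_left {s1 s2 : String} (h : s1 ∉ pvAllSkills) :
    are_related_technologies_py s1 s2 = false := by
  unfold are_related_technologies_py
  rw [pvALoop_eq_any, List.any_eq_false]
  intro st hst
  rw [pv_contains_false_of_notin h hst]
  simp

lemma pvA_false_right {s1 s2 : String} (h : s2 ∉ pvAllSkills) :
    are_related_technologies_py s1 s2 = false := by
  unfold are_related_technologies_py
  rw [pvALoop_eq_any, List.any_eq_false]
  intro st hst
  rw [pv_contains_false_of_notin h hst]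
  simp

lemma pv_index_keys_sub {s : String} (h : s ∈ pvStackIndex.keys) : s ∈ pvAllSkills := by
  fin_cases h <;> decide

lemma pv_getD_nil_of_notin {s : String} (h : s ∉ pvAllSkills) :
    pvStackIndex.getD s [] = [] := by
  apply PySem.Dict.getD_of_not_contains
  rw [PySem.Dict.contains_eq_decide_mem_keys]
  simpa using fun hm => h (pv_index_keys_sub hm)

lemma pvB_false_of_nil_left {s1 s2 : String} (h : pvStackIndex.getD s1 [] = []) :
    are_related_technologies_py_alt s1 s2 = false := by
  unfold are_related_technologies_py_alt
  rw [h]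
  have : PySem.Set.inter ([] : PySem.Set Int) (pvStackIndex.getD s2 []) = [] := by
    apply List.eq_nil_iff_forall_not_mem.mpr
    intro x hx
    exact (List.not_mem_nil) ((PySem.Set.mem_inter _ _ _).mp hx).1
  simp [this]

lemma pvB_false_of_nil_right {s1 s2 : String} (h : pvStackIndex.getD s2 [] = []) :
    are_related_technologies_py_alt s1 s2 = false := by
  unfold are_related_technologies_py_alt
  rw [h]
  have : PySem.Set.inter (pvStackIndex.getD s1 []) ([] : PySem.Set Int) = [] := by
    apply List.eq_nil_iff_forall_not_mem.mpr
    intro x hx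
    exact (List.not_mem_nil) ((PySem.Set.mem_inter _ _ _).mp hx).2
  simp [this]

-- on the finitely many skills the table mentions, the two ports agree (checked pointwise)
set_option maxRecDepth 100000 in
set_option maxHeartbeats 2000000 in
lemma pv_agree_on_table :
    (pvAllSkills.all fun s1 => pvAllSkills.all fun s2 =>
      are_related_technologies_py s1 s2 == are_related_technologies_py_alt s1 s2) = true := by
  decide

-- ===== VERDICT =====
theorem are_related_technologies_py_spec : Claim_equal_are_related_technologies_py := by
  intro s1 s2 _
  unfold Spec_are_related_technologies_py
  by_cases h1 : s1 ∈ pvAllSkills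
  · by_cases h2 : s2 ∈ pvAllSkills
    · have := pv_agree_on_table
      rw [List.all_eq_true] at this
      have := (List.all_eq_true).mp (this s1 h1) s2 h2
      exact eq_of_beq this
    · rw [pvA_false_right h2, pvB_false_of_nil_right (pv_getD_nil_of_notin h2)]
  · rw [pvA_false_left h1, pvB_false_of_nil_left (pv_getD_nil_of_notin h1)]
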